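-- pv_equiv track=rewrite | github.com/jul-ienfr/Swarm | prediction_markets/market_graph.py | _alignment_dimensions_from_notes
-- ===== SOURCE A (Python) =====
-- def _alignment_dimensions_from_notes(notes: list[str] | None) -> list[str]:
--     tokens = set(notes or [])
--     dimensions: list[str] = []
--     if any(token in {"resolution_mismatch", "resolution_source_mismatch"} for token in tokens):
--         dimensions.append("resolution")
--     if "currency_mismatch" in tokens:
--         dimensions.append("currency")
--     if "payout_currency_mismatch" in tokens:
--         dimensions.append("payout")
--     if any(token.startswith(("timebox_", "cutoff_", "timezone_")) for token in tokens):
--         dimensions.append("timing")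
--     return dimensions
-- ===== SOURCE B (Python) =====
-- _EXACT_DIMENSION = {
--     "resolution_mismatch": "resolution",
--     "resolution_source_mismatch": "resolution",
--     "currency_mismatch": "currency",
--     "payout_currency_mismatch": "payout",
-- }
--
--
-- def _classify(token: str) -> str | None:
--     dim = _EXACT_DIMENSION.get(token)
--     if dim is not None:
--         return dim
--     if token.startswith(("timebox_", "cutoff_", "timezone_")):
--         return "timing"
--     return None
--
--
-- def _alignment_dimensions_from_notes(notes: list[str] | None) -> list[str]:
--     hit = {_classify(token) for token in (notes or [])}
--     return [dim for dim in ("resolution", "currency", "payout", "timing") if dim in hit]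
-- ===== Notes on version B (the rewrite author's own statement) =====
-- stated objective: alternative
-- what changed: B inverts the control flow: instead of A's four dimension-driven scans/membership tests over a token set, B classifies each token once into its dimension via a token->dimension lookup table (with a prefix fallback for timing), collects the hit dimensions in a set, and filters the canonical (resolution, currency, payout, timing) tuple by membership.
import Mathlib
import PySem

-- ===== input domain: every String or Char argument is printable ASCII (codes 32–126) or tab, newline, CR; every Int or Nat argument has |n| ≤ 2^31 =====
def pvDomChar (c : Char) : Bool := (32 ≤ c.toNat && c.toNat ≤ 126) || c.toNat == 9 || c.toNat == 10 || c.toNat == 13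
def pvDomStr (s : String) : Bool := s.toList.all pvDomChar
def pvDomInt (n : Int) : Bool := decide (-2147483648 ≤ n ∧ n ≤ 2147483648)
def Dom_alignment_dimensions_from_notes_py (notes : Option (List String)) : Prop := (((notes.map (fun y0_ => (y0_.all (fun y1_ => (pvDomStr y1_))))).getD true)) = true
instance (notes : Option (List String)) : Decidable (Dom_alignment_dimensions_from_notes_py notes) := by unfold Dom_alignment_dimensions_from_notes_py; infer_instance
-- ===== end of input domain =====

-- B inverts the control flow: a token->dimension classifier (lookup table + prefix fallback)
-- builds the set of hit dimensions, then the canonical dimension tuple is filtered by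
-- membership (objective: alternative).

-- ===== PORT A =====
def pvIsTiming (t : String) : Bool :=
  PySem.Str.startswith t "timebox_" || PySem.Str.startswith t "cutoff_" || PySem.Str.startswith t "timezone_"

def pvIsResolution (t : String) : Bool :=
  t == "resolution_mismatch" || t == "resolution_source_mismatch"

def alignment_dimensions_from_notes_py (notes : Option (List String)) : List String :=
  let tokens : PySem.Set String := PySem.Set.ofList (notes.getD [])
  let d0 : List String := []
  let d1 := if tokens.any pvIsResolution then d0 ++ ["resolution"] else d0
  let d2 := if PySem.Set.contains tokens "currency_mismatch" then d1 ++ ["currency"] else d1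
  let d3 := if PySem.Set.contains tokens "payout_currency_mismatch" then d2 ++ ["payout"] else d2
  let d4 := if tokens.any pvIsTiming then d3 ++ ["timing"] else d3
  d4

-- ===== PORT B =====
def pvExactDimension : PySem.Dict String String := PySem.Dict.ofList
  [("resolution_mismatch", "resolution"),
   ("resolution_source_mismatch", "resolution"),
   ("currency_mismatch", "currency"),
   ("payout_currency_mismatch", "payout")]

-- 'dim or timing-check' in Source B: the dict values are non-empty strings, so truthiness = isSome
def pvClassify (t : String) : Option String :=
  match PySem.Dict.get? pvExactDimension t with
  | some dim => some dim
  | none =>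
      if PySem.Str.startswith t "timebox_" || PySem.Str.startswith t "cutoff_" || PySem.Str.startswith t "timezone_"
      then some "timing" else none

def alignment_dimensions_from_notes_py_alt (notes : Option (List String)) : List String :=
  let hit : PySem.Set (Option String) := PySem.Set.ofList ((notes.getD []).map pvClassify)
  (["resolution", "currency", "payout", "timing"]).filter
    (fun dim => PySem.Set.contains hit (some dim))

-- ===== PRECONDITION & SPEC =====
def Spec_alignment_dimensions_from_notes_py (notes : Option (List String)) (out : List String) : Prop := out = alignment_dimensions_from_notes_py_alt notes
instance (notes : Option (List String)) (out : List String) : Decidable (Spec_alignment_dimensions_from_notes_py notes out) := by unfold Spec_alignment_dimensions_from_notes_py; infer_instance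

-- ===== CLAIM (what is proved, stated in full; the proofs are below) =====
def Claim_equal_alignment_dimensions_from_notes_py : Prop := ∀ (notes : Option (List String)), Dom_alignment_dimensions_from_notes_py notes → Spec_alignment_dimensions_from_notes_py notes (alignment_dimensions_from_notes_py notes)

-- ===== LEMMAS AND PROOFS =====

theorem pv_any_ofList (xs : List String) (p : String → Bool) :
    (PySem.Set.ofList xs).any p = xs.any p := by
  cases h : xs.any p with
  | true =>
    rw [List.any_eq_true] at h ⊢
    obtain ⟨x, hx, hp⟩ := h
    exact ⟨x, (PySem.Set.mem_ofList _ _).2 hx, hp⟩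
  | false =>
    rw [List.any_eq_false] at h ⊢
    intro x hx
    exact h x ((PySem.Set.mem_ofList _ _).1 hx)

theorem pv_contains_ofList (xs : List String) (s : String) :
    PySem.Set.contains (PySem.Set.ofList xs) s = xs.any (· == s) := by
  simp [PySem.Set.contains, PySem.Set.mem_ofList, List.any_beq']

theorem pv_contains_ofList_map (xs : List String) (y : Option String) :
    PySem.Set.contains (PySem.Set.ofList (xs.map pvClassify)) y
      = xs.any (fun t => pvClassify t == y) := by
  rw [Bool.eq_iff_iff]
  simp only [PySem.Set.contains, List.contains_iff_mem, PySem.Set.mem_ofList, List.mem_map,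
    List.any_eq_true]
  constructor
  · rintro ⟨t, ht, he⟩; exact ⟨t, ht, by simp [he]⟩
  · rintro ⟨t, ht, he⟩; exact ⟨t, ht, eq_of_beq he⟩

theorem pv_get_exact (t : String) : PySem.Dict.get? pvExactDimension t =
    (if "resolution_mismatch" == t then some "resolution"
     else if "resolution_source_mismatch" == t then some "resolution"
     else if "currency_mismatch" == t then some "currency"
     else if "payout_currency_mismatch" == t then some "payout"
     else none) := by
  have h : pvExactDimension = PySem.Dict.mk
      [("resolution_mismatch", "resolution"), ("resolution_source_mismatch", "resolution"),
       ("currency_mismatch", "currency"), ("payout_currency_mismatch", "payout")] := by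
    rfl
  rw [h]
  simp only [PySem.Dict.get?_mk_cons]
  split_ifs <;> simp_all [PySem.Dict.get?]

theorem pv_classify_res (t : String) :
    (pvClassify t == some "resolution") = pvIsResolution t := by
  unfold pvClassify
  rw [pv_get_exact]
  by_cases h1 : "resolution_mismatch" = t
  · rw [← h1]; decide
  by_cases h2 : "resolution_source_mismatch" = t
  · rw [← h2]; decide
  by_cases h3 : "currency_mismatch" = t
  · rw [← h3]; decide
  by_cases h4 : "payout_currency_mismatch" = t
  · rw [← h4]; decide
  · rw [if_neg (by simpa using h1), if_neg (by simpa using h2),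
        if_neg (by simpa using h3), if_neg (by simpa using h4)]
    have e1 : (t == "resolution_mismatch") = false := by
      simp only [beq_eq_false_iff_ne]; exact fun h => h1 h.symm
    have e2 : (t == "resolution_source_mismatch") = false := by
      simp only [beq_eq_false_iff_ne]; exact fun h => h2 h.symm
    simp only [pvIsResolution, e1, e2]
    split <;> simp

theorem pv_classify_cur (t : String) :
    (pvClassify t == some "currency") = (t == "currency_mismatch") := by
  unfold pvClassify
  rw [pv_get_exact]
  by_cases h1 : "resolution_mismatch" = t
  · rw [← h1]; decide
  by_cases h2 : "resolution_source_mismatch" = t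
  · rw [← h2]; decide
  by_cases h3 : "currency_mismatch" = t
  · rw [← h3]; decide
  by_cases h4 : "payout_currency_mismatch" = t
  · rw [← h4]; decide
  · rw [if_neg (by simpa using h1), if_neg (by simpa using h2),
        if_neg (by simpa using h3), if_neg (by simpa using h4)]
    have e3 : (t == "currency_mismatch") = false := by
      simp only [beq_eq_false_iff_ne]; exact fun h => h3 h.symm
    simp only [e3]
    split <;> simp

theorem pv_classify_pay (t : String) :
    (pvClassify t == some "payout") = (t == "payout_currency_mismatch") := by
  unfold pvClassify
  rw [pv_get_exact]
  by_cases h1 : "resolution_mismatch" = t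
  · rw [← h1]; decide
  by_cases h2 : "resolution_source_mismatch" = t
  · rw [← h2]; decide
  by_cases h3 : "currency_mismatch" = t
  · rw [← h3]; decide
  by_cases h4 : "payout_currency_mismatch" = t
  · rw [← h4]; decide
  · rw [if_neg (by simpa using h1), if_neg (by simpa using h2),
        if_neg (by simpa using h3), if_neg (by simpa using h4)]
    have e4 : (t == "payout_currency_mismatch") = false := by
      simp only [beq_eq_false_iff_ne]; exact fun h => h4 h.symm
    simp only [e4]
    split <;> simp

theorem pv_classify_tim (t : String) :
    (pvClassify t == some "timing") = pvIsTiming t := by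
  unfold pvClassify
  rw [pv_get_exact]
  by_cases h1 : "resolution_mismatch" = t
  · rw [← h1]; decide
  by_cases h2 : "resolution_source_mismatch" = t
  · rw [← h2]; decide
  by_cases h3 : "currency_mismatch" = t
  · rw [← h3]; decide
  by_cases h4 : "payout_currency_mismatch" = t
  · rw [← h4]; decide
  · rw [if_neg (by simpa using h1), if_neg (by simpa using h2),
        if_neg (by simpa using h3), if_neg (by simpa using h4)]
    simp only [pvIsTiming]
    cases h : (PySem.Str.startswith t "timebox_" || PySem.Str.startswith t "cutoff_" || PySem.Str.startswith t "timezone_") <;>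
      simp_all

-- ===== VERDICT (by name: the statement is the Claim_ definition above) =====
theorem alignment_dimensions_from_notes_py_spec : Claim_equal_alignment_dimensions_from_notes_py := by
  intro notes _
  unfold Spec_alignment_dimensions_from_notes_py alignment_dimensions_from_notes_py alignment_dimensions_from_notes_py_alt
  simp only [pv_any_ofList, pv_contains_ofList, pv_contains_ofList_map, List.filter]
  set xs := notes.getD []
  have e1 : (xs.any fun t => pvClassify t == some "resolution") = xs.any pvIsResolution := by
    simp only [pv_classify_res]
  have e2 : (xs.any fun t => pvClassify t == some "currency") = xs.any (· == "currency_mismatch") := by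
    simp only [pv_classify_cur]
  have e3 : (xs.any fun t => pvClassify t == some "payout") = xs.any (· == "payout_currency_mismatch") := by
    simp only [pv_classify_pay]
  have e4 : (xs.any fun t => pvClassify t == some "timing") = xs.any pvIsTiming := by
    simp only [pv_classify_tim]
  rw [e1, e2, e3, e4]
  cases h1 : xs.any pvIsResolution <;>
  cases h2 : xs.any (· == "currency_mismatch") <;>
  cases h3 : xs.any (· == "payout_currency_mismatch") <;>
  cases h4 : xs.any pvIsTiming <;> simp
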